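-- pv_equiv track=rewrite | github.com/akshwalia/nlp-to-sql-langgraph | src/core/database/analyzer.py | _detect_schema_changes
-- ===== SOURCE A (Python) =====
-- from typing import Dict, List, Any, Tuple, Optional
--
-- def _detect_schema_changes(queries: List[str]) -> bool:
--     """
--     Detect if any of the queries contain schema-changing operations
--
--     Args:
--         queries: List of SQL queries to analyze
--
--     Returns:
--         True if schema changes detected, False otherwise
--     """
--     schema_changing_keywords = [
--         'CREATE TABLE', 'DROP TABLE', 'ALTER TABLE',
--         'CREATE INDEX', 'DROP INDEX', 'CREATE VIEW', 'DROP VIEW',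
--         'CREATE SCHEMA', 'DROP SCHEMA', 'RENAME TABLE',
--         'ADD COLUMN', 'DROP COLUMN', 'RENAME COLUMN',
--         'CREATE SEQUENCE', 'DROP SEQUENCE', 'TRUNCATE TABLE'
--     ]
--
--     for query in queries:
--         query_upper = query.upper().strip()
--         for keyword in schema_changing_keywords:
--             if keyword in query_upper:
--                 return True
--
--     return False
-- ===== SOURCE B (Python) =====
-- _SCHEMA_CHANGING_KEYWORDS = [
--     'CREATE TABLE', 'DROP TABLE', 'ALTER TABLE',
--     'CREATE INDEX', 'DROP INDEX', 'CREATE VIEW', 'DROP VIEW',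
--     'CREATE SCHEMA', 'DROP SCHEMA', 'RENAME TABLE',
--     'ADD COLUMN', 'DROP COLUMN', 'RENAME COLUMN',
--     'CREATE SEQUENCE', 'DROP SEQUENCE', 'TRUNCATE TABLE'
-- ]
--
--
-- def _build_trie(keywords):
--     root = {}
--     for kw in keywords:
--         node = root
--         for ch in kw:
--             node = node.setdefault(ch, {})
--         node['$'] = True  # end-of-keyword marker
--     return root
--
--
-- _TRIE = _build_trie(_SCHEMA_CHANGING_KEYWORDS)
--
--
-- def _detect_schema_changes(queries):
--     for query in queries:
--         text = query.upper().strip()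
--         n = len(text)
--         for i in range(n):
--             node = _TRIE
--             j = i
--             while True:
--                 if '$' in node:
--                     return True
--                 if j >= n or text[j] not in node:
--                     break
--                 node = node[text[j]]
--                 j += 1
--     return False
-- ===== Notes on version B (the rewrite author's own statement) =====
-- stated objective: alternative
-- what changed: B builds an explicit character trie of the keywords once (a dict-of-dicts) and, per query, walks the trie from each start position, so the inner per-keyword substring loop disappears and shared keyword prefixes (CREATE/DROP/...) are examined once per position.
import Mathlib
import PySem

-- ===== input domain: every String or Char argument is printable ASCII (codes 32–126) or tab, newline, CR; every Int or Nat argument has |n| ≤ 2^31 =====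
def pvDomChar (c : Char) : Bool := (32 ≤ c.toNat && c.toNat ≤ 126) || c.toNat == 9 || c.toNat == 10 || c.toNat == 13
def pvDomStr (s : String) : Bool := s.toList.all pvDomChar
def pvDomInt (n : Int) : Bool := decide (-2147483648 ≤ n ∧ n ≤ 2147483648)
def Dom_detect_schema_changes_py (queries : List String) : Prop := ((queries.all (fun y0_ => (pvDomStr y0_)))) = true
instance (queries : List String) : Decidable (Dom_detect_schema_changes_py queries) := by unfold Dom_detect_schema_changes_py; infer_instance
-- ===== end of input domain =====

-- B replaces A's inner per-keyword substring loop with a character trie built once from the keywords and walked from each start position (alternative data structure; return value identical).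


-- ===== PORT A =====
-- the keyword list of A, verbatim
def pvKeywordsA : List String :=
  ["CREATE TABLE", "DROP TABLE", "ALTER TABLE",
   "CREATE INDEX", "DROP INDEX", "CREATE VIEW", "DROP VIEW",
   "CREATE SCHEMA", "DROP SCHEMA", "RENAME TABLE",
   "ADD COLUMN", "DROP COLUMN", "RENAME COLUMN",
   "CREATE SEQUENCE", "DROP SEQUENCE", "TRUNCATE TABLE"]

-- outer loop with early return; inner loop = any keyword `in` query_upper
def detect_schema_changes_py (queries : List String) : Bool :=
  match queries with
  | [] => false
  | q :: rest =>
    let query_upper := PySem.Str.strip (PySem.Str.upper q)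
    if pvKeywordsA.any (fun keyword => PySem.Str.isIn keyword query_upper) then true
    else detect_schema_changes_py rest

-- ===== PORT B =====
-- B's trie (Python: dict-of-dicts with a '$' end marker); children as a total
-- function Char → PvTrie with a `fail` sentinel for "key absent".
inductive PvTrie where
  | fail : PvTrie
  | node : Bool → (Char → PvTrie) → PvTrie

def pvAccept : PvTrie → Bool
  | .fail => false
  | .node a _ => a

def pvChild : PvTrie → Char → PvTrie
  | .fail, _ => .fail
  | .node _ f, c => f c

-- one keyword's insertion walk (Python: node = node.setdefault(ch, {}) …; node['$'] = True)
def pvInsert : PvTrie → List Char → PvTrie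
  | t, [] => .node true (pvChild t)
  | t, c :: k =>
    .node (pvAccept t) (fun d => if d = c then pvInsert (pvChild t c) k else pvChild t d)

def pvKeywordsB : List (List Char) :=
  ["CREATE TABLE".toList, "DROP TABLE".toList, "ALTER TABLE".toList,
   "CREATE INDEX".toList, "DROP INDEX".toList, "CREATE VIEW".toList, "DROP VIEW".toList,
   "CREATE SCHEMA".toList, "DROP SCHEMA".toList, "RENAME TABLE".toList,
   "ADD COLUMN".toList, "DROP COLUMN".toList, "RENAME COLUMN".toList,
   "CREATE SEQUENCE".toList, "DROP SEQUENCE".toList, "TRUNCATE TABLE".toList]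

def pvTrie : PvTrie := pvKeywordsB.foldl pvInsert .fail

-- the inner while loop: walk the trie down the suffix, stop at '$' or a missing edge
def pvMatchAt : PvTrie → List Char → Bool
  | t, [] => pvAccept t
  | t, c :: s => pvAccept t || pvMatchAt (pvChild t c) s

-- the `for i in range(n)` loop: try every start position
def pvSearch : List Char → Bool
  | [] => false
  | c :: s => pvMatchAt pvTrie (c :: s) || pvSearch s

def detect_schema_changes_py_alt (queries : List String) : Bool :=
  match queries with
  | [] => false
  | q :: rest =>
    if pvSearch (PySem.Str.strip (PySem.Str.upper q)).toList then true
    else detect_schema_changes_py_alt rest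

-- ===== PRECONDITION & SPEC =====
def Spec_detect_schema_changes_py (queries : List String) (out : Bool) : Prop := out = detect_schema_changes_py_alt queries
instance (queries : List String) (out : Bool) : Decidable (Spec_detect_schema_changes_py queries out) := by unfold Spec_detect_schema_changes_py; infer_instance

-- ===== CLAIM (what is proved, stated in full; the proofs are below) =====
def Claim_equal_detect_schema_changes_py : Prop := ∀ (queries : List String), Dom_detect_schema_changes_py queries → Spec_detect_schema_changes_py queries (detect_schema_changes_py queries)

-- ===== LEMMAS AND PROOFS =====

lemma pv_matchAt_fail (s : List Char) : pvMatchAt .fail s = false := by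
  induction s with
  | nil => rfl
  | cons c t ih => simp [pvMatchAt, pvChild, pvAccept, ih]

lemma pv_matchAt_insert (k : List Char) :
    ∀ (t : PvTrie) (s : List Char),
      pvMatchAt (pvInsert t k) s = (k.isPrefixOf s || pvMatchAt t s) := by
  induction k with
  | nil =>
    intro t s
    cases s <;> simp [pvInsert, pvMatchAt, pvAccept, pvChild]
  | cons c k ih =>
    intro t s
    cases s with
    | nil => simp [pvInsert, pvMatchAt, pvAccept, List.isPrefixOf]
    | cons d s' =>
      by_cases h : d = c
      · subst h
        simp [pvInsert, pvMatchAt, pvAccept, pvChild, ih, List.isPrefixOf]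
        rcases k.isPrefixOf s' <;> rcases pvAccept t <;> simp
      · have hcd : (c == d) = false := by
          simp; exact fun hh => h hh.symm
        simp [pvInsert, pvMatchAt, pvAccept, pvChild, h, List.isPrefixOf, hcd]

lemma pv_matchAt_foldl (l : List (List Char)) :
    ∀ (t : PvTrie) (s : List Char),
      pvMatchAt (l.foldl pvInsert t) s = (l.any (fun k => k.isPrefixOf s) || pvMatchAt t s) := by
  induction l with
  | nil => intro t s; simp
  | cons k l ih =>
    intro t s
    simp [List.foldl, ih, pv_matchAt_insert, Bool.or_assoc, Bool.or_left_comm]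

lemma pv_matchAt_trie (s : List Char) :
    pvMatchAt pvTrie s = pvKeywordsB.any (fun k => k.isPrefixOf s) := by
  simp [pvTrie, pv_matchAt_foldl, pv_matchAt_fail]

lemma pv_isIn_cons (k : List Char) (c : Char) (t : List Char) :
    PySem.Chars.isIn k (c :: t) = (k.isPrefixOf (c :: t) || PySem.Chars.isIn k t) := by
  rcases h : k.isPrefixOf (c :: t) with _ | _ <;>
  rcases h2 : PySem.Chars.isIn k t with _ | _ <;> simp only [Bool.or_self, Bool.or_true, Bool.or_false] <;>
  first
  | (apply (PySem.Chars.isIn_iff_infix _ _).mpr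
     simp [List.infix_cons_iff]
     first
     | exact Or.inl (List.isPrefixOf_iff_prefix.mp h)
     | exact Or.inr ((PySem.Chars.isIn_iff_infix _ _).mp h2))
  | (apply (PySem.Chars.isIn_eq_false_iff _ _).mpr
     simp [List.infix_cons_iff]
     exact ⟨fun hp => by simp [List.isPrefixOf_iff_prefix.mpr hp] at h,
            fun hi => by simp [(PySem.Chars.isIn_iff_infix _ _).mpr hi] at h2⟩)

lemma pv_any_or {a : Type} (l : List a) (p q : a -> Bool) :
    l.any (fun x => p x || q x) = (l.any p || l.any q) := by
  induction l with
  | nil => simp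
  | cons x l ih => simp [ih, Bool.or_assoc, Bool.or_left_comm]

lemma pv_search_eq (s : List Char) :
    pvSearch s = pvKeywordsB.any (fun k => PySem.Chars.isIn k s) := by
  induction s with
  | nil => decide
  | cons c t ih =>
    rw [pvSearch, pv_matchAt_trie]
    simp only [pv_isIn_cons, pv_any_or, ← ih]

lemma pv_inner_eq (qu : String) :
    pvKeywordsA.any (fun keyword => PySem.Str.isIn keyword qu) = pvSearch qu.toList := by
  rw [pv_search_eq]
  simp [pvKeywordsA, pvKeywordsB]

lemma pv_main (queries : List String) :
    detect_schema_changes_py queries = detect_schema_changes_py_alt queries := by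
  induction queries with
  | nil => rfl
  | cons q rest ih =>
    rw [detect_schema_changes_py, detect_schema_changes_py_alt, pv_inner_eq, ih]

-- ===== VERDICT (by name: the statement is the Claim_ definition above) =====
theorem detect_schema_changes_py_spec : Claim_equal_detect_schema_changes_py := by
  intro queries _
  exact pv_main queries
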